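-- pv_equiv track=rewrite | github.com/WhaitSources/Coding-Interview | pairs.py | solution
-- ===== SOURCE A (Python) =====
-- def solution(A):
--     for a1 in range(len(A)):
--         for a2 in range(len(A)):
--             for b1 in range(len(A)):
--                 for b2 in range(len(A)):
--                     if(A[a1] == A[a2] and A[b1] == A[b2] and a1 != a2 and b1 != b2 and a1 != b1 and a2 != b2 and a1 != b2 and a2 != b1):
--                         return True
--     return False
-- ===== SOURCE B (Python) =====
-- def solution(A):
--     counts = {}
--     for x in A:
--         counts[x] = counts.get(x, 0) + 1
--     pairs = 0
--     for c in counts.values():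
--         pairs += c // 2
--     return pairs >= 2
-- ===== Notes on version B (the rewrite author's own statement) =====
-- stated objective: faster
-- what changed: Replaces the quadruple nested index scan with a single counting pass over a hash map: two disjoint equal pairs exist iff the sum over values of count//2 is at least 2.
import Mathlib
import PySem

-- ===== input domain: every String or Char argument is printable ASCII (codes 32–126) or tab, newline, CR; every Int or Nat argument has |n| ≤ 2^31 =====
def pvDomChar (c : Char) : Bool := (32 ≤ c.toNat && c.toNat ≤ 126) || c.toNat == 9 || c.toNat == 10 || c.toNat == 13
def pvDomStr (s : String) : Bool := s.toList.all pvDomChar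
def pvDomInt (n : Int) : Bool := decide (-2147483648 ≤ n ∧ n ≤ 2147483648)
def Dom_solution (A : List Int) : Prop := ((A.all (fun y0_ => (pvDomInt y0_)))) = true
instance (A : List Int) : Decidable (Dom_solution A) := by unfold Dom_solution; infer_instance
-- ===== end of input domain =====

-- B replaces A's quadruple nested index scan by one counting pass over a dict (two disjoint equal pairs exist iff the sum of count//2 over values is ≥ 2).

-- ===== PORT A =====
def solution (A : List Int) : Bool :=
  (PySem.List.pyRange 0 (PySem.List.len A) 1).any fun a1 =>
    (PySem.List.pyRange 0 (PySem.List.len A) 1).any fun a2 =>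
      (PySem.List.pyRange 0 (PySem.List.len A) 1).any fun b1 =>
        (PySem.List.pyRange 0 (PySem.List.len A) 1).any fun b2 =>
          decide (PySem.List.pyGetD A a1 0 = PySem.List.pyGetD A a2 0) &&
          decide (PySem.List.pyGetD A b1 0 = PySem.List.pyGetD A b2 0) &&
          (a1 != a2) && (b1 != b2) && (a1 != b1) && (a2 != b2) && (a1 != b2) && (a2 != b1)

-- ===== PORT B =====
def solution_alt (A : List Int) : Bool :=
  let counts := A.foldl (fun d x => d.insert x (d.getD x 0 + 1)) PySem.Dict.empty
  let pairs := counts.values.foldl (fun acc c => acc + PySem.Int.floordiv c 2) 0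
  decide (2 ≤ pairs)

-- ===== PRECONDITION & SPEC =====
def Spec_solution (A : List Int) (out : Bool) : Prop := out = solution_alt A
instance (A : List Int) (out : Bool) : Decidable (Spec_solution A out) := by unfold Spec_solution; infer_instance

-- ===== CLAIM (what is proved, stated in full; the proofs are below) =====
def Claim_equal_solution : Prop := ∀ (A : List Int), Dom_solution A → Spec_solution A (solution A)

-- ===== LEMMAS AND PROOFS =====

-- the set of positions of value v in A
def idxSet (A : List Int) (v : Int) : Finset ℕ :=
  (Finset.range A.length).filter (fun i => A.getD i 0 = v)

lemma mem_idxSet (A : List Int) (v : Int) (i : ℕ) :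
    i ∈ idxSet A v ↔ i < A.length ∧ A.getD i 0 = v := by
  simp [idxSet]

lemma count_eq_card_idxSet (A : List Int) (v : Int) : A.count v = (idxSet A v).card := by
  induction A using List.reverseRecOn with
  | nil => simp [idxSet]
  | append_singleton xs x ih =>
    unfold idxSet at *
    rw [List.count_append, List.length_append]
    simp only [List.length_cons, List.length_nil]
    rw [Finset.range_add_one, Finset.filter_insert]
    have hcongr : Finset.filter (fun i => (xs ++ [x]).getD i 0 = v) (Finset.range xs.length)
        = Finset.filter (fun i => xs.getD i 0 = v) (Finset.range xs.length) := by
      apply Finset.filter_congr; intro i hi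
      simp only [Finset.mem_range] at hi
      simp [List.getElem?_append_left hi]
    have hlast : (xs ++ [x]).getD xs.length 0 = x := by
      simp [List.getD_eq_getElem?_getD]
    rw [hcongr, hlast]
    by_cases hx : x = v
    · rw [hx, if_pos rfl, Finset.card_insert_of_notMem (by simp)]
      simp [ih]
    · simp [hx, ih]

-- sum of a Nat-valued map dominates two terms at distinct members
lemma two_le_sum_map (l : List Int) (f : Int → ℕ) (v w : Int)
    (hv : v ∈ l) (hw : w ∈ l) (hvw : v ≠ w) : f v + f w ≤ (l.map f).sum := by
  obtain ⟨l1, l2, rfl⟩ := List.append_of_mem hv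
  rw [List.map_append, List.sum_append, List.map_cons, List.sum_cons]
  rcases List.mem_append.mp hw with h | h
  · have h2 : f w ≤ (l1.map f).sum :=
      List.single_le_sum (by simp) _ (List.mem_map_of_mem h)
    omega
  · rcases List.mem_cons.mp h with h' | h'
    · exact absurd h'.symm hvw
    · have h2 : f w ≤ (l2.map f).sum :=
        List.single_le_sum (by simp) _ (List.mem_map_of_mem h')
      omega

lemma sum_le_countP (l : List Int) (f : Int → ℕ) (hle : ∀ x ∈ l, f x ≤ 1) :
    (l.map f).sum ≤ l.countP (fun x => 1 ≤ f x) := by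
  induction l with
  | nil => simp
  | cons x t ih =>
    rw [List.map_cons, List.sum_cons, List.countP_cons]
    have hx := hle x (by simp)
    have ht := ih (fun y hy => hle y (by simp [hy]))
    by_cases h1 : 1 ≤ f x
    · rw [if_pos (by simpa using h1)]
      omega
    · rw [if_neg (by simpa using h1)]
      omega

lemma exists_two_of_two_le_countP (l : List Int) (hnd : l.Nodup) (p : Int → Bool)
    (h : 2 ≤ l.countP p) : ∃ v ∈ l, ∃ w ∈ l, v ≠ w ∧ p v ∧ p w := by
  induction l with
  | nil => simp at h
  | cons x t ih =>
    rw [List.countP_cons] at h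
    rcases List.nodup_cons.mp hnd with ⟨hx, hnt⟩
    by_cases hpx : p x
    · have h1 : 1 ≤ t.countP p := by rw [if_pos hpx] at h; omega
      obtain ⟨w, hwmem, hpw⟩ := List.countP_pos_iff.mp (show 0 < t.countP p by omega)
      exact ⟨x, by simp, w, by simp [hwmem], fun he => hx (he ▸ hwmem), hpx, hpw⟩
    · have h2 : 2 ≤ t.countP p := by rw [if_neg hpx] at h; omega
      obtain ⟨v, hv, w, hw, hvw, hpv, hpw⟩ := ih hnt h2
      exact ⟨v, by simp [hv], w, by simp [hw], hvw, hpv, hpw⟩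

lemma four_distinct (s : Finset ℕ) (h : 4 ≤ s.card) :
    ∃ a b c d, a ∈ s ∧ b ∈ s ∧ c ∈ s ∧ d ∈ s ∧
      a ≠ b ∧ a ≠ c ∧ a ≠ d ∧ b ≠ c ∧ b ≠ d ∧ c ≠ d := by
  obtain ⟨a, ha⟩ := Finset.card_pos.mp (show 0 < s.card by omega)
  have h1 : 3 ≤ (s.erase a).card := by rw [Finset.card_erase_of_mem ha]; omega
  obtain ⟨b, hb⟩ := Finset.card_pos.mp (show 0 < (s.erase a).card by omega)
  have h2 : 2 ≤ ((s.erase a).erase b).card := by rw [Finset.card_erase_of_mem hb]; omega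
  obtain ⟨c, hc⟩ := Finset.card_pos.mp (show 0 < ((s.erase a).erase b).card by omega)
  have h3 : 1 ≤ (((s.erase a).erase b).erase c).card := by rw [Finset.card_erase_of_mem hc]; omega
  obtain ⟨d, hd⟩ := Finset.card_pos.mp (show 0 < (((s.erase a).erase b).erase c).card by omega)
  simp only [Finset.mem_erase] at hb hc hd
  exact ⟨a, b, c, d, ha, hb.2, hc.2.2, hd.2.2.2,
    fun e => hb.1 e.symm, fun e => hc.2.1 e.symm, fun e => hd.2.2.1 e.symm,
    fun e => hc.1 e.symm, fun e => hd.2.1 e.symm, fun e => hd.1 e.symm⟩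

-- A returns True exactly when two index-disjoint equal pairs exist
lemma solution_eq_true_iff (A : List Int) :
    solution A = true ↔ ∃ a1 a2 b1 b2 : ℕ, a1 < A.length ∧ a2 < A.length ∧
      b1 < A.length ∧ b2 < A.length ∧
      A.getD a1 0 = A.getD a2 0 ∧ A.getD b1 0 = A.getD b2 0 ∧
      a1 ≠ a2 ∧ b1 ≠ b2 ∧ a1 ≠ b1 ∧ a2 ≠ b2 ∧ a1 ≠ b2 ∧ a2 ≠ b1 := by
  have hget : ∀ i : Int, 0 ≤ i → PySem.List.pyGetD A i 0 = A.getD i.toNat 0 := by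
    intro i h1
    obtain ⟨k, rfl⟩ := Int.eq_ofNat_of_zero_le h1
    simp
  unfold solution
  simp only [List.any_eq_true, PySem.List.mem_pyRange_one, PySem.List.len_eq,
    Bool.and_eq_true, decide_eq_true_eq, bne_iff_ne, ne_eq]
  constructor
  · rintro ⟨a1, ⟨ha1, ha1'⟩, a2, ⟨ha2, ha2'⟩, b1, ⟨hb1, hb1'⟩, b2, ⟨hb2, hb2'⟩,
      ⟨⟨⟨⟨⟨⟨hv, hw⟩, h12⟩, h34⟩, h13⟩, h24⟩, h14⟩, h23⟩
    rw [hget a1 ha1, hget a2 ha2] at hv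
    rw [hget b1 hb1, hget b2 hb2] at hw
    exact ⟨a1.toNat, a2.toNat, b1.toNat, b2.toNat, by omega, by omega, by omega, by omega,
      hv, hw, by omega, by omega, by omega, by omega, by omega, by omega⟩
  · rintro ⟨a1, a2, b1, b2, ha1, ha2, hb1, hb2, hv, hw, h12, h34, h13, h24, h14, h23⟩
    refine ⟨(a1 : ℤ), ⟨by omega, by omega⟩, (a2 : ℤ), ⟨by omega, by omega⟩,
      (b1 : ℤ), ⟨by omega, by omega⟩, (b2 : ℤ), ⟨by omega, by omega⟩, ?_⟩
    refine ⟨⟨⟨⟨⟨⟨⟨?_, ?_⟩, by omega⟩, by omega⟩, by omega⟩, by omega⟩, by omega⟩, by omega⟩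
    · rw [hget _ (by omega), hget _ (by omega)]; simpa using hv
    · rw [hget _ (by omega), hget _ (by omega)]; simpa using hw

-- B returns True exactly when the summed pair capacity is at least 2
lemma solution_alt_eq_true_iff (A : List Int) :
    solution_alt A = true ↔ 2 ≤ ((PySem.Set.ofList A).map (fun v => A.count v / 2)).sum := by
  simp only [solution_alt, PySem.Dict.foldl_insert_getD_add_one_eq_counter, decide_eq_true_eq]
  rw [PySem.List.foldl_add (g := fun c => PySem.Int.floordiv c 2)]
  simp only [PySem.Dict.values, PySem.Dict.items_counter, List.map_map]
  have hmap : ((PySem.Set.ofList A).map ((fun c => PySem.Int.floordiv c 2) ∘ Prod.snd ∘ (fun k => (k, (A.count k : Int))))).sum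
      = (((PySem.Set.ofList A).map (fun v => A.count v / 2)).sum : Int) := by
    rw [Nat.cast_list_sum, List.map_map]
    apply congrArg
    apply List.map_congr_left
    intro k _
    simp only [Function.comp]
    exact_mod_cast PySem.Int.floordiv_natCast (A.count k) 2
  rw [hmap]
  omega

lemma main_iff (A : List Int) :
    (∃ a1 a2 b1 b2 : ℕ, a1 < A.length ∧ a2 < A.length ∧
      b1 < A.length ∧ b2 < A.length ∧
      A.getD a1 0 = A.getD a2 0 ∧ A.getD b1 0 = A.getD b2 0 ∧
      a1 ≠ a2 ∧ b1 ≠ b2 ∧ a1 ≠ b1 ∧ a2 ≠ b2 ∧ a1 ≠ b2 ∧ a2 ≠ b1) ↔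
    2 ≤ ((PySem.Set.ofList A).map (fun v => A.count v / 2)).sum := by
  constructor
  · rintro ⟨a1, a2, b1, b2, h1, h2, h3, h4, hv, hw, d12, d34, d13, d24, d14, d23⟩
    set v := A.getD a1 0 with hvdef
    set w := A.getD b1 0 with hwdef
    have hvA : v ∈ A := by rw [hvdef, List.getD_eq_getElem _ _ h1]; exact List.getElem_mem _
    have hwA : w ∈ A := by rw [hwdef, List.getD_eq_getElem _ _ h3]; exact List.getElem_mem _
    have hvS : v ∈ PySem.Set.ofList A := (PySem.Set.mem_ofList _ _).mpr hvA
    have hwS : w ∈ PySem.Set.ofList A := (PySem.Set.mem_ofList _ _).mpr hwA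
    have ma1 : a1 ∈ idxSet A v := (mem_idxSet _ _ _).mpr ⟨h1, rfl⟩
    have ma2 : a2 ∈ idxSet A v := (mem_idxSet _ _ _).mpr ⟨h2, hv.symm⟩
    have mb1 : b1 ∈ idxSet A w := (mem_idxSet _ _ _).mpr ⟨h3, rfl⟩
    have mb2 : b2 ∈ idxSet A w := (mem_idxSet _ _ _).mpr ⟨h4, hw.symm⟩
    by_cases hvw : v = w
    · -- all four indices share the value: count ≥ 4
      have hsub : ({a1, a2, b1, b2} : Finset ℕ) ⊆ idxSet A v := by
        intro i hi
        simp only [Finset.mem_insert, Finset.mem_singleton] at hi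
        rcases hi with rfl | rfl | rfl | rfl
        · exact ma1
        · exact ma2
        · exact hvw ▸ mb1
        · exact hvw ▸ mb2
      have hcard : ({a1, a2, b1, b2} : Finset ℕ).card = 4 := by
        rw [Finset.card_insert_of_notMem (by simp [d12, d13, d14]),
          Finset.card_insert_of_notMem (by simp [d24, d23]),
          Finset.card_insert_of_notMem (by simp [d34]), Finset.card_singleton]
      have h4c : 4 ≤ A.count v := by
        rw [count_eq_card_idxSet]
        calc 4 = ({a1, a2, b1, b2} : Finset ℕ).card := hcard.symm
        _ ≤ _ := Finset.card_le_card hsub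
      have hterm : 2 ≤ A.count v / 2 := by omega
      calc (2 : ℕ) ≤ A.count v / 2 := hterm
      _ ≤ _ := List.single_le_sum (by simp) _ (List.mem_map.mpr ⟨v, hvS, rfl⟩)
    · -- two different values, each with count ≥ 2
      have hv2 : 2 ≤ A.count v := by
        rw [count_eq_card_idxSet]
        exact Finset.one_lt_card.mpr ⟨a1, ma1, a2, ma2, d12⟩
      have hw2 : 2 ≤ A.count w := by
        rw [count_eq_card_idxSet]
        exact Finset.one_lt_card.mpr ⟨b1, mb1, b2, mb2, d34⟩
      have hsum : A.count v / 2 + A.count w / 2 ≤ ((PySem.Set.ofList A).map (fun v => A.count v / 2)).sum :=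
        two_le_sum_map (PySem.Set.ofList A) (fun v => A.count v / 2) v w hvS hwS hvw
      have hv1 : 1 ≤ A.count v / 2 := by omega
      have hw1 : 1 ≤ A.count w / 2 := by omega
      omega
  · intro h
    by_cases hbig : ∃ v ∈ PySem.Set.ofList A, 2 ≤ A.count v / 2
    · obtain ⟨v, _, hv2⟩ := hbig
      have h4c : 4 ≤ (idxSet A v).card := by
        rw [← count_eq_card_idxSet]; omega
      obtain ⟨a, b, c, d, ha, hb, hc, hd, hab, hac, had, hbc, hbd, hcd⟩ :=
        four_distinct _ h4c
      rw [mem_idxSet] at ha hb hc hd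
      exact ⟨a, b, c, d, ha.1, hb.1, hc.1, hd.1, by rw [ha.2, hb.2], by rw [hc.2, hd.2],
        hab, hcd, hac, fun e => hbd e, had, hbc⟩
    · push Not at hbig
      have hle : ∀ x ∈ PySem.Set.ofList A, A.count x / 2 ≤ 1 := by
        intro x hx; have := hbig x hx; omega
      have hcp : 2 ≤ (PySem.Set.ofList A).countP (fun x => 1 ≤ A.count x / 2) := by
        have hsc : ((PySem.Set.ofList A).map (fun v => A.count v / 2)).sum ≤
            (PySem.Set.ofList A).countP (fun x => decide (1 ≤ A.count x / 2)) :=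
          sum_le_countP (PySem.Set.ofList A) (fun v => A.count v / 2) hle
        omega
      obtain ⟨v, hvS, w, hwS, hvw, hpv, hpw⟩ :=
        exists_two_of_two_le_countP _ (PySem.Set.nodup_ofList A) _ hcp
      simp only [decide_eq_true_eq] at hpv hpw
      have hv2 : 2 ≤ A.count v := by omega
      have hw2 : 2 ≤ A.count w := by omega
      obtain ⟨a1, ma1, a2, ma2, d12⟩ := Finset.one_lt_card.mp
        (show 1 < (idxSet A v).card by rw [← count_eq_card_idxSet]; omega)
      obtain ⟨b1, mb1, b2, mb2, d34⟩ := Finset.one_lt_card.mp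
        (show 1 < (idxSet A w).card by rw [← count_eq_card_idxSet]; omega)
      rw [mem_idxSet] at ma1 ma2 mb1 mb2
      refine ⟨a1, a2, b1, b2, ma1.1, ma2.1, mb1.1, mb2.1,
        by rw [ma1.2, ma2.2], by rw [mb1.2, mb2.2], d12, d34, ?_, ?_, ?_, ?_⟩
      · intro e; apply hvw; rw [← ma1.2, ← mb1.2, e]
      · intro e; apply hvw; rw [← ma2.2, ← mb2.2, e]
      · intro e; apply hvw; rw [← ma1.2, ← mb2.2, e]
      · intro e; apply hvw; rw [← ma2.2, ← mb1.2, e]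

-- ===== VERDICT (by name: the statement is the Claim_ definition above) =====
theorem solution_spec : Claim_equal_solution := by
  intro A _
  unfold Spec_solution
  rw [Bool.eq_iff_iff, solution_eq_true_iff, solution_alt_eq_true_iff]
  exact main_iff A
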